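-- pv_equiv track=rewrite | github.com/greybeetle213/toki_ilo_pona | o-open.py | toki_pona_to_base_10
-- ===== SOURCE A (Python) =====
-- def toki_pona_to_base_10(tpnum):
--     tpnum = tpnum.replace(" ", "")
--     base_ten_number = 0
--     weka = False
--
--     if tpnum[:4] == "weka":
--         weka = True
--         tpnum = tpnum[4:]
--
--     if tpnum == "ala":
--         return 0
--
--     while len(tpnum) > 0:
--         if tpnum.startswith("a"):
--             tpnum = tpnum[3:]
--             base_ten_number *= 100
--         elif tpnum.startswith("m"):
--             tpnum = tpnum[4:]
--             base_ten_number += 20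
--         elif tpnum.startswith("l"):
--             tpnum = tpnum[4:]
--             base_ten_number += 5
--         elif tpnum.startswith("t"):
--             tpnum = tpnum[2:]
--             base_ten_number += 2
--         elif tpnum.startswith("w"):
--             tpnum = tpnum[3:]
--             base_ten_number += 1
--
--     if weka:
--         base_ten_number *= -1
--
--     return base_ten_number
-- ===== SOURCE B (Python) =====
-- # Single pass with an index pointer over the space-stripped string: no repeated
-- # slicing, no redundant "ala" special case.  Raises ValueError on a malformed
-- # numeral, where the original loops forever (both outside Pre_).
-- def toki_pona_to_base_10(tpnum):
--     s = tpnum.replace(" ", "")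
--     neg = s.startswith("weka")
--     i = 4 if neg else 0
--     total = 0
--     n = len(s)
--     while i < n:
--         c = s[i]
--         if c == 'a':
--             total *= 100
--             i += 3
--         elif c == 'm':
--             total += 20
--             i += 4
--         elif c == 'l':
--             total += 5
--             i += 4
--         elif c == 't':
--             total += 2
--             i += 2
--         elif c == 'w':
--             total += 1
--             i += 3
--         else:
--             raise ValueError("not a toki pona numeral: " + tpnum)
--     return -total if neg else total
-- ===== Notes on version B (the rewrite author's own statement) =====
-- stated objective: faster
-- what changed: B replaces A's while-loop of repeated string slicing (and the redundant 'ala' special case) with a single left-to-right pass moving an index pointer over the space-stripped string.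
import Mathlib
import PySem

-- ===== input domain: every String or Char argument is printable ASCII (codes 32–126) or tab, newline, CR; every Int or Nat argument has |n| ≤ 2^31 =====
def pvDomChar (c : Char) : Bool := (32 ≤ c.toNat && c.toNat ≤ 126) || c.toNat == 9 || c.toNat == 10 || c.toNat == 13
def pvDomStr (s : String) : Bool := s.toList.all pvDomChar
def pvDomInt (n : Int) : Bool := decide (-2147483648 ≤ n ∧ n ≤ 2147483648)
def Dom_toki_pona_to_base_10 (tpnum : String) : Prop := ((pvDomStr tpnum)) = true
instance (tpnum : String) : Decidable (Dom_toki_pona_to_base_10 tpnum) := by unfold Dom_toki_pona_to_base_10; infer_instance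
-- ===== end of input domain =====

-- B parses the numeral in one left-to-right pass with an index pointer instead of A's repeated slicing.

-- ===== PORT A =====
-- A's while-loop: re-slices the remaining string each iteration.  Python diverges when no
-- branch fires; fuel (ample inside Pre_, where every step consumes ≥ 2 chars) makes the port total.
def tpLoopA : Nat → List Char → Int → Int
  | 0, _, acc => acc  -- fuel exhausted: only reachable where the Python loops forever (outside Pre_)
  | fuel + 1, s, acc =>
    if s.length > 0 then
      if PySem.Chars.startswith s ['a'] then tpLoopA fuel (PySem.Chars.slice s (some 3) none) (acc * 100)
      else if PySem.Chars.startswith s ['m'] then tpLoopA fuel (PySem.Chars.slice s (some 4) none) (acc + 20)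
      else if PySem.Chars.startswith s ['l'] then tpLoopA fuel (PySem.Chars.slice s (some 4) none) (acc + 5)
      else if PySem.Chars.startswith s ['t'] then tpLoopA fuel (PySem.Chars.slice s (some 2) none) (acc + 2)
      else if PySem.Chars.startswith s ['w'] then tpLoopA fuel (PySem.Chars.slice s (some 3) none) (acc + 1)
      else tpLoopA fuel s acc  -- no branch: Python spins forever
    else acc

def toki_pona_to_base_10 (tpnum : String) : Int :=
  -- tpnum = tpnum.replace(" ", "")  (working over the code points; PySem.Str.replace = Chars.replace on toList)
  let s0 := PySem.Chars.replace tpnum.toList [' '] []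
  if PySem.Chars.slice s0 none (some 4) = ['w','e','k','a'] then
    -- weka = True; tpnum = tpnum[4:]
    let s1 := PySem.Chars.slice s0 (some 4) none
    if s1 = ['a','l','a'] then 0
    else tpLoopA (s1.length + 1) s1 0 * (-1)
  else
    if s0 = ['a','l','a'] then 0
    else tpLoopA (s0.length + 1) s0 0

-- ===== PORT B =====
-- B's loop: an index pointer i over the fixed char list; Python raises ValueError on an
-- unknown character (unreachable inside Pre_), the port returns the accumulator there.
def tpLoopB (s : List Char) (i : Nat) (acc : Int) : Int :=
  if h : i < s.length then
    let c := s[i]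
    if c = 'a' then tpLoopB s (i + 3) (acc * 100)
    else if c = 'm' then tpLoopB s (i + 4) (acc + 20)
    else if c = 'l' then tpLoopB s (i + 4) (acc + 5)
    else if c = 't' then tpLoopB s (i + 2) (acc + 2)
    else if c = 'w' then tpLoopB s (i + 3) (acc + 1)
    else acc  -- ValueError in Python; outside Pre_
  else acc
termination_by s.length - i
decreasing_by all_goals omega

def toki_pona_to_base_10_alt (tpnum : String) : Int :=
  let s := PySem.Chars.replace tpnum.toList [' '] []
  if PySem.Chars.startswith s ['w','e','k','a'] then -(tpLoopB s 4 0)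
  else tpLoopB s 0 0

-- ===== PRECONDITION & SPEC =====
-- Each scan step consumes 3/4/4/2/3 chars according to the first char of the step
-- (exactly A's loop positions); a step landing on any other char makes A loop forever.
def tpScanOk : Nat → List Char → Bool
  | _, [] => true
  | 0, _ :: _ => false  -- fuel out (never happens with fuel ≥ the list's length: steps consume ≥ 2 chars)
  | fuel + 1, c :: rest =>
    if c = 'a' then tpScanOk fuel (rest.drop 2)
    else if c = 'm' then tpScanOk fuel (rest.drop 3)
    else if c = 'l' then tpScanOk fuel (rest.drop 3)
    else if c = 't' then tpScanOk fuel (rest.drop 1)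
    else if c = 'w' then tpScanOk fuel (rest.drop 2)
    else false

-- Pre_ excludes exactly the inputs on which A's while-loop never terminates (the Python hangs):
-- after removing spaces and a leading "weka", the variable-step scan must meet only a/m/l/t/w.
def Pre_toki_pona_to_base_10 (tpnum : String) : Prop :=
  tpScanOk tpnum.toList.length
           (if ['w','e','k','a'] <+: PySem.Chars.replace tpnum.toList [' '] []
            then (PySem.Chars.replace tpnum.toList [' '] []).drop 4
            else PySem.Chars.replace tpnum.toList [' '] []) = true
instance (tpnum : String) : Decidable (Pre_toki_pona_to_base_10 tpnum) := by unfold Pre_toki_pona_to_base_10; infer_instance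

def pvWitness_toki_pona_to_base_10 : String := "weka mute luka tu wan"

def Spec_toki_pona_to_base_10 (tpnum : String) (out : Int) : Prop := out = toki_pona_to_base_10_alt tpnum
instance (tpnum : String) (out : Int) : Decidable (Spec_toki_pona_to_base_10 tpnum out) := by unfold Spec_toki_pona_to_base_10; infer_instance

-- ===== CLAIM (what is proved, stated in full; the proofs are below) =====
def Claim_equal_toki_pona_to_base_10 : Prop := ∀ (tpnum : String), Dom_toki_pona_to_base_10 tpnum → Pre_toki_pona_to_base_10 tpnum → Spec_toki_pona_to_base_10 tpnum (toki_pona_to_base_10 tpnum)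

-- ===== LEMMAS AND PROOFS =====

lemma startswith_cons (c a : Char) (t : List Char) :
    PySem.Chars.startswith (c :: t) [a] = (a == c) := by
  simp [PySem.Chars.startswith, List.isPrefixOf]

lemma sliceFrom2 (l : List Char) : PySem.Chars.slice l (some 2) none = l.drop 2 := by simp [pysem]
lemma sliceFrom3 (l : List Char) : PySem.Chars.slice l (some 3) none = l.drop 3 := by simp [pysem]
lemma sliceFrom4 (l : List Char) : PySem.Chars.slice l (some 4) none = l.drop 4 := by simp [pysem]

-- one unfolding step of each loop, with the branch structure laid bare
lemma tpLoopA_cons (f : Nat) (c : Char) (t : List Char) (acc : Int) :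
    tpLoopA (f + 1) (c :: t) acc =
      (if 'a' = c then tpLoopA f ((c :: t).drop 3) (acc * 100)
       else if 'm' = c then tpLoopA f ((c :: t).drop 4) (acc + 20)
       else if 'l' = c then tpLoopA f ((c :: t).drop 4) (acc + 5)
       else if 't' = c then tpLoopA f ((c :: t).drop 2) (acc + 2)
       else if 'w' = c then tpLoopA f ((c :: t).drop 3) (acc + 1)
       else tpLoopA f (c :: t) acc) := by
  simp only [tpLoopA, startswith_cons, beq_iff_eq, sliceFrom2, sliceFrom3, sliceFrom4,
    List.length_cons, gt_iff_lt, Nat.zero_lt_succ, if_true]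

lemma tpLoopB_step (s : List Char) (i : Nat) (acc : Int) (h : i < s.length) :
    tpLoopB s i acc =
      (if s[i] = 'a' then tpLoopB s (i + 3) (acc * 100)
       else if s[i] = 'm' then tpLoopB s (i + 4) (acc + 20)
       else if s[i] = 'l' then tpLoopB s (i + 4) (acc + 5)
       else if s[i] = 't' then tpLoopB s (i + 2) (acc + 2)
       else if s[i] = 'w' then tpLoopB s (i + 3) (acc + 1)
       else acc) := by
  rw [tpLoopB, dif_pos h]

lemma tpLoopB_stop (s : List Char) (i : Nat) (acc : Int) (h : ¬ i < s.length) :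
    tpLoopB s i acc = acc := by
  rw [tpLoopB, dif_neg h]

-- the heart of the equivalence: A's slicing loop on the suffix s.drop i equals B's index loop at i
lemma tpLoopAB (s : List Char) (fuel : Nat) :
    ∀ (g i : Nat) (acc : Int), s.length - i < fuel → tpScanOk g (s.drop i) = true →
      tpLoopA fuel (s.drop i) acc = tpLoopB s i acc := by
  induction fuel with
  | zero => intro g i acc h _; omega
  | succ f ih =>
    intro g i acc hf hok
    by_cases hi : i < s.length
    · have hd : s.drop i = s[i] :: s.drop (i + 1) := List.drop_eq_getElem_cons hi
      rw [hd] at hok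
      obtain ⟨g', rfl⟩ : ∃ g', g = g' + 1 := by
        cases g with
        | zero => simp [tpScanOk] at hok
        | succ g => exact ⟨g, rfl⟩
      simp only [tpScanOk] at hok
      rw [tpLoopB_step s i acc hi]
      conv_lhs => rw [hd]
      rw [tpLoopA_cons]
      by_cases ha : s[i] = 'a'
      · rw [if_pos ha] at hok; rw [List.drop_drop] at hok
        rw [if_pos ha, if_pos ha.symm, ← hd, List.drop_drop]
        exact ih g' (i + 3) (acc * 100) (by omega) hok
      · by_cases hm : s[i] = 'm'
        · rw [if_neg ha, if_pos hm] at hok; rw [List.drop_drop] at hok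
          rw [if_neg ha, if_pos hm, if_neg (fun h => ha h.symm), if_pos hm.symm, ← hd,
            List.drop_drop]
          exact ih g' (i + 4) (acc + 20) (by omega) hok
        · by_cases hl : s[i] = 'l'
          · rw [if_neg ha, if_neg hm, if_pos hl] at hok; rw [List.drop_drop] at hok
            rw [if_neg ha, if_neg hm, if_pos hl, if_neg (fun h => ha h.symm),
              if_neg (fun h => hm h.symm), if_pos hl.symm, ← hd, List.drop_drop]
            exact ih g' (i + 4) (acc + 5) (by omega) hok
          · by_cases ht : s[i] = 't'
            · rw [if_neg ha, if_neg hm, if_neg hl, if_pos ht] at hok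
              rw [List.drop_drop] at hok
              rw [if_neg ha, if_neg hm, if_neg hl, if_pos ht, if_neg (fun h => ha h.symm),
                if_neg (fun h => hm h.symm), if_neg (fun h => hl h.symm), if_pos ht.symm, ← hd,
                List.drop_drop]
              exact ih g' (i + 2) (acc + 2) (by omega) hok
            · by_cases hw : s[i] = 'w'
              · rw [if_neg ha, if_neg hm, if_neg hl, if_neg ht, if_pos hw] at hok
                rw [List.drop_drop] at hok
                rw [if_neg ha, if_neg hm, if_neg hl, if_neg ht, if_pos hw,
                  if_neg (fun h => ha h.symm), if_neg (fun h => hm h.symm),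
                  if_neg (fun h => hl h.symm), if_neg (fun h => ht h.symm), if_pos hw.symm, ← hd,
                  List.drop_drop]
                exact ih g' (i + 3) (acc + 1) (by omega) hok
              · rw [if_neg ha, if_neg hm, if_neg hl, if_neg ht, if_neg hw] at hok
                simp at hok
    · have hnil : s.drop i = ([] : List Char) := List.drop_eq_nil_of_le (by omega)
      rw [hnil, tpLoopB_stop s i acc hi]
      simp [tpLoopA]

-- ===== VERDICT (by name: the statement is the Claim_ definition above) =====
theorem toki_pona_to_base_10_spec : Claim_equal_toki_pona_to_base_10 := by
  intro tpnum _ hpre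
  unfold Spec_toki_pona_to_base_10
  unfold Pre_toki_pona_to_base_10 at hpre
  simp only [toki_pona_to_base_10, toki_pona_to_base_10_alt]
  set s0 := PySem.Chars.replace tpnum.toList [' '] [] with hs0
  have htake : PySem.Chars.slice s0 none (some 4) = s0.take 4 := by simp [pysem]
  rw [htake, sliceFrom4]
  by_cases hw : ['w','e','k','a'] <+: s0
  · have hwt : s0.take 4 = ['w','e','k','a'] := by
      have := (List.prefix_iff_eq_take).mp hw
      simpa using this.symm
    have hsw : PySem.Chars.startswith s0 ['w','e','k','a'] = true := by
      rw [PySem.Chars.startswith_iff]; exact hw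
    rw [if_pos hwt, if_pos hsw]
    rw [if_pos hw] at hpre
    by_cases hala : s0.drop 4 = ['a','l','a']
    · rw [if_pos hala]
      have hlen : (s0.drop 4).length = 3 := by rw [hala]; rfl
      have h4 := tpLoopAB s0 4 tpnum.toList.length 4 0 (by simp at hlen; omega) hpre
      rw [hala] at h4
      rw [← h4]
      decide
    · rw [if_neg hala]
      have h := tpLoopAB s0 ((s0.drop 4).length + 1) tpnum.toList.length 4 0 (by rw [List.length_drop]; omega) hpre
      rw [h]; ring
  · have hwt : ¬ (s0.take 4 = ['w','e','k','a']) := fun hc =>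
      hw (by rw [List.prefix_iff_eq_take]; simpa using hc.symm)
    have hsw : ¬ (PySem.Chars.startswith s0 ['w','e','k','a'] = true) := by
      rw [PySem.Chars.startswith_iff]; exact hw
    rw [if_neg hwt, if_neg hsw]
    rw [if_neg hw] at hpre
    by_cases hala : s0 = ['a','l','a']
    · rw [if_pos hala]
      have hlen : s0.length = 3 := by rw [hala]; rfl
      have h4 := tpLoopAB s0 4 tpnum.toList.length 0 0 (by omega) (by simpa using hpre)
      rw [show s0.drop 0 = ['a','l','a'] from by rw [List.drop_zero, hala]] at h4
      rw [← h4]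
      decide
    · rw [if_neg hala]
      have h := tpLoopAB s0 (s0.length + 1) tpnum.toList.length 0 0 (by omega) (by simpa using hpre)
      rw [List.drop_zero] at h
      exact h
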